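-- pv_equiv track=rewrite | github.com/5agado/data-science-learning | graphics/n_dimensions/n_dimensions_utils.py | _get_object_faces
-- ===== SOURCE A (Python) =====
-- def _get_object_faces(points, edges, nb_vertices=4):
--     faces = []
--     for p_idx, p in enumerate(points):
--         _get_object_faces_rec(edges, [], p_idx, faces, nb_vertices)
--
--     # remove same faces
--     faces_set = []
--     unique_faces = []
--     for face in faces:
--         if set(face) not in faces_set:
--             unique_faces.append([int(idx) for idx in face])
--             faces_set.append(set(face))
--     return unique_faces
--
-- def _get_object_faces_rec(edges, p_idxs, next_p_idx, faces, nb_vertices):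
--     if len(p_idxs) >= nb_vertices:
--         if p_idxs[0] == next_p_idx:
--             if set(p_idxs) not in faces:
--                 faces.append(p_idxs)
--     else:
--         if next_p_idx not in p_idxs:
--             cur_p_idx = next_p_idx
--             for e in edges:
--                 if cur_p_idx in e:
--                     tmp_e = list(e)
--                     tmp_e.remove(cur_p_idx)
--                     next_p_idx = tmp_e[0]
--                     _get_object_faces_rec(edges, p_idxs + [cur_p_idx], next_p_idx, faces, nb_vertices)
-- ===== SOURCE B (Python) =====
-- def _get_object_faces(points, edges, nb_vertices=4):
--     faces = []
--     for start in range(len(points)):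
--         stack = [(start, [])]
--         while stack:
--             cur, path = stack.pop()
--             if len(path) >= nb_vertices:
--                 if path[0] == cur:
--                     faces.append(path)
--             elif cur not in path:
--                 new_path = path + [cur]
--                 for a, b in reversed(edges):
--                     if cur == a:
--                         stack.append((b, new_path))
--                     elif cur == b:
--                         stack.append((a, new_path))
--     unique_faces = []
--     seen = []
--     for face in faces:
--         s = set(face)
--         if s not in seen:
--             seen.append(s)
--             unique_faces.append([int(i) for i in face])
--     return unique_faces
-- ===== Notes on version B (the rewrite author's own statement) =====
-- stated objective: alternative
-- what changed: Replaces the recursive face-search helper with an explicit stack-based DFS (frames of (vertex, path), pushed in reverse edge order to preserve discovery order); the final first-seen set-based dedup is kept.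
import Mathlib
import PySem

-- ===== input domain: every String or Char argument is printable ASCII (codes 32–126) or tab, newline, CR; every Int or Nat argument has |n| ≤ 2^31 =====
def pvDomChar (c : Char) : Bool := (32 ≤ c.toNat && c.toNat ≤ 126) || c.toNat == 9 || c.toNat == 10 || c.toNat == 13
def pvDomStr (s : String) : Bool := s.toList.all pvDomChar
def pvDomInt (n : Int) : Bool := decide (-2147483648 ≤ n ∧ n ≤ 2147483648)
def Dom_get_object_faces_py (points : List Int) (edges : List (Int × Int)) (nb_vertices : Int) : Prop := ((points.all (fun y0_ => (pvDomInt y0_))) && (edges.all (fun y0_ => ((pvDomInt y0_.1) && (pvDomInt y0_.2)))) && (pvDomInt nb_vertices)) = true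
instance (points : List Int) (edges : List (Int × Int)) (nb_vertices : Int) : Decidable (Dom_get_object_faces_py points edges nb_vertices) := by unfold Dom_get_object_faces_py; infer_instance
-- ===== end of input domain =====

-- B replaces the recursive face search by an explicit stack-based DFS (same cost, different decomposition); objective: alternative.

-- ===== PORT A =====
-- _get_object_faces_rec: the recursion depth is bounded because the path grows until its length reaches nb.
def facesRecA (edges : List (Int × Int)) (nb : Int) (p_idxs : List Int) (next_p : Int)
    (faces : List (List Int)) : List (List Int) :=
  if (p_idxs.length : Int) ≥ nb then
    -- p_idxs[0]: Python raises IndexError on empty p_idxs (reachable only when nb ≤ 0, excluded by Pre_); headI is exact elsewhere.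
    -- 'if set(p_idxs) not in faces': a Python set never equals a list, so the test is always true and the append always happens.
    if p_idxs.headI = next_p then faces ++ [p_idxs] else faces
  else if next_p ∈ p_idxs then faces
  else
    edges.foldl
      (fun fs e =>
        if next_p = e.1 ∨ next_p = e.2 then
          -- tmp_e = list(e); tmp_e.remove(cur); next = tmp_e[0]
          facesRecA edges nb (p_idxs ++ [next_p]) (if next_p = e.1 then e.2 else e.1) fs
        else fs)
      faces
termination_by (nb - p_idxs.length).toNat
decreasing_by simp_all [List.length_append]; omega

-- the dedup loop of _get_object_faces: (faces_set, unique_faces) accumulator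
def dedupFacesA (faces : List (List Int)) : List (PySem.Set Int) × List (List Int) :=
  faces.foldl
    (fun acc face =>
      if acc.1.any (fun s => PySem.Set.equal s (PySem.Set.ofList face)) then acc
      else (acc.1 ++ [PySem.Set.ofList face], acc.2 ++ [face.map (fun idx => idx)]))
    ([], [])

def get_object_faces_py (points : List Int) (edges : List (Int × Int)) (nb_vertices : Int) : List (List Int) :=
  let faces := (PySem.List.enumerate points 0).foldl
    (fun fs pe => facesRecA edges nb_vertices [] pe.1 fs) []
  (dedupFacesA faces).2

-- ===== PORT B =====
-- frame weight: an upper bound on the work left for one stack frame; used only as fuel for totality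
def pvFrameW (edges : List (Int × Int)) (nb : Int) (f : Int × List Int) : Nat :=
  (edges.length + 1) ^ ((nb - f.2.length).toNat)

-- 'for a, b in reversed(edges): … stack.append(…)' — head of the list is the top of the stack
def pushFramesB (edges : List (Int × Int)) (cur : Int) (np : List Int)
    (st : List (Int × List Int)) : List (Int × List Int) :=
  edges.reverse.foldl
    (fun st e =>
      if cur = e.1 then (e.2, np) :: st
      else if cur = e.2 then (e.1, np) :: st
      else st)
    st

-- Source B's 'while stack:' loop; the fuel argument only makes the loop total (it never runs out:
-- the summed frame weights strictly decrease at every iteration, see dfsBFuel_eq below)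
def dfsBFuel (edges : List (Int × Int)) (nb : Int) :
    Nat → List (Int × List Int) → List (List Int) → List (List Int)
  | _, [], faces => faces
  | 0, _ :: _, faces => faces
  | fuel + 1, (cur, path) :: rest, faces =>
    if (path.length : Int) ≥ nb then
      dfsBFuel edges nb fuel rest (if path.headI = cur then faces ++ [path] else faces)
    else if cur ∈ path then dfsBFuel edges nb fuel rest faces
    else dfsBFuel edges nb fuel (pushFramesB edges cur (path ++ [cur]) rest) faces

def dfsB (edges : List (Int × Int)) (nb : Int) (stack : List (Int × List Int))
    (faces : List (List Int)) : List (List Int) :=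
  dfsBFuel edges nb ((stack.map (pvFrameW edges nb)).sum) stack faces

-- Source B's dedup pass
def dedupFacesB (faces : List (List Int)) : List (PySem.Set Int) × List (List Int) :=
  faces.foldl
    (fun acc face =>
      let s := PySem.Set.ofList face
      if acc.1.any (fun t => PySem.Set.equal t s) then acc
      else (acc.1 ++ [s], acc.2 ++ [face.map (fun i => i)]))
    ([], [])

def get_object_faces_py_alt (points : List Int) (edges : List (Int × Int)) (nb_vertices : Int) : List (List Int) :=
  let faces := (PySem.List.pyRange 0 (PySem.List.len points) 1).foldl
    (fun fs start => dfsB edges nb_vertices [(start, [])] fs) []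
  (dedupFacesB faces).2

-- ===== PRECONDITION & SPEC =====
-- Pre_ excludes only nb_vertices ≤ 0 with nonempty points, where Python A raises IndexError (p_idxs[0] on the empty path).
def Pre_get_object_faces_py (points : List Int) (edges : List (Int × Int)) (nb_vertices : Int) : Prop :=
  points = [] ∨ 1 ≤ nb_vertices
instance (points : List Int) (edges : List (Int × Int)) (nb_vertices : Int) : Decidable (Pre_get_object_faces_py points edges nb_vertices) := by unfold Pre_get_object_faces_py; infer_instance
def pvWitness_get_object_faces_py : List Int × (List (Int × Int)) × Int :=
  ([1, 2, 3, 4], [(0, 1), (1, 2), (2, 3), (3, 0)], 4)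

def Spec_get_object_faces_py (points : List Int) (edges : List (Int × Int)) (nb_vertices : Int) (out : List (List Int)) : Prop := out = get_object_faces_py_alt points edges nb_vertices
instance (points : List Int) (edges : List (Int × Int)) (nb_vertices : Int) (out : List (List Int)) : Decidable (Spec_get_object_faces_py points edges nb_vertices out) := by unfold Spec_get_object_faces_py; infer_instance

-- ===== CLAIM (what is proved, stated in full; the proofs are below) =====
def Claim_equal_get_object_faces_py : Prop := ∀ (points : List Int) (edges : List (Int × Int)) (nb_vertices : Int), Dom_get_object_faces_py points edges nb_vertices → Pre_get_object_faces_py points edges nb_vertices → Spec_get_object_faces_py points edges nb_vertices (get_object_faces_py points edges nb_vertices)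

-- ===== LEMMAS AND PROOFS =====

theorem pvFrameW_pos (edges : List (Int × Int)) (nb : Int) (f : Int × List Int) :
    1 ≤ pvFrameW edges nb f := Nat.one_le_pow _ _ (Nat.succ_pos _)

theorem pushFramesB_wsum (edges : List (Int × Int)) (nb : Int) (cur : Int) (np : List Int) :
    ∀ (es : List (Int × Int)) (st : List (Int × List Int)),
      (((es.foldl (fun st e =>
          if cur = e.1 then (e.2, np) :: st
          else if cur = e.2 then (e.1, np) :: st
          else st) st).map (pvFrameW edges nb)).sum : Nat)
        ≤ es.length * (edges.length + 1) ^ ((nb - np.length).toNat)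
            + ((st.map (pvFrameW edges nb)).sum : Nat) := by
  intro es
  induction es with
  | nil => intro st; simp
  | cons e es ih =>
    intro st
    simp only [List.foldl_cons, List.length_cons]
    refine le_trans (ih _) ?_
    rw [Nat.succ_mul]
    have hst : (((if cur = e.1 then (e.2, np) :: st
          else if cur = e.2 then (e.1, np) :: st
          else st).map (pvFrameW edges nb)).sum : Nat)
        ≤ (edges.length + 1) ^ ((nb - np.length).toNat)
            + ((st.map (pvFrameW edges nb)).sum : Nat) := by
      split_ifs <;> simp [pvFrameW]
    omega

-- one loop iteration strictly shrinks the summed frame weights (push case)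
theorem pushFramesB_wsum_lt (edges : List (Int × Int)) (nb : Int) (cur : Int) (path : List Int)
    (rest : List (Int × List Int)) (hlen : (path.length : Int) < nb) :
    (((pushFramesB edges cur (path ++ [cur]) rest).map (pvFrameW edges nb)).sum : Nat)
      < (((cur, path) :: rest).map (pvFrameW edges nb)).sum := by
  simp only [List.map_cons, List.sum_cons, pushFramesB]
  have h1 := pushFramesB_wsum edges nb cur (path ++ [cur]) edges.reverse rest
  have hb : (nb - ((path ++ [cur]).length : Int)).toNat + 1
      = (nb - (path.length : Int)).toNat := by
    simp [List.length_append]; omega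
  have hw : pvFrameW edges nb (cur, path)
      = (edges.length + 1) ^ ((nb - ((path ++ [cur]).length : Int)).toNat) * (edges.length + 1) := by
    simp only [pvFrameW]
    rw [← pow_succ, hb]
  have hp1 : 1 ≤ (edges.length + 1) ^ ((nb - ((path ++ [cur]).length : Int)).toNat) :=
    Nat.one_le_pow _ _ (Nat.succ_pos _)
  rw [List.length_reverse] at h1
  rw [hw, Nat.mul_succ, Nat.mul_comm]
  omega

-- with enough fuel, the result does not depend on the fuel
theorem dfsBFuel_eq (edges : List (Int × Int)) (nb : Int) :
    ∀ (f1 : Nat) (stack : List (Int × List Int)) (faces : List (List Int)) (f2 : Nat),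
      (stack.map (pvFrameW edges nb)).sum ≤ f1 → (stack.map (pvFrameW edges nb)).sum ≤ f2 →
      dfsBFuel edges nb f1 stack faces = dfsBFuel edges nb f2 stack faces := by
  intro f1
  induction f1 with
  | zero =>
    intro stack faces f2 h1 h2
    cases stack with
    | nil => cases f2 <;> rfl
    | cons hd tl =>
      exfalso
      have := pvFrameW_pos edges nb hd
      simp only [List.map_cons, List.sum_cons] at h1
      omega
  | succ f ih =>
    intro stack faces f2 h1 h2
    cases stack with
    | nil => cases f2 <;> rfl
    | cons hd tl =>
      obtain ⟨cur, path⟩ := hd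
      have hw := pvFrameW_pos edges nb (cur, path)
      simp only [List.map_cons, List.sum_cons] at h1 h2
      cases f2 with
      | zero => exfalso; omega
      | succ g =>
        rw [dfsBFuel, dfsBFuel]
        by_cases hge : (path.length : Int) ≥ nb
        · simp only [if_pos hge]
          exact ih _ _ _ (by omega) (by omega)
        · simp only [if_neg hge]
          by_cases hmem : cur ∈ path
          · simp only [if_pos hmem]
            exact ih _ _ _ (by omega) (by omega)
          · simp only [if_neg hmem]
            have hlt := pushFramesB_wsum_lt edges nb cur path tl (by omega)
            simp only [List.map_cons, List.sum_cons] at hlt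
            exact ih _ _ _ (by omega) (by omega)

theorem dfsB_nil (edges : List (Int × Int)) (nb : Int) (faces : List (List Int)) :
    dfsB edges nb [] faces = faces := rfl

-- one step of the stack loop, phrased on the fuel-free wrapper
theorem dfsB_cons (edges : List (Int × Int)) (nb : Int) (cur : Int) (path : List Int)
    (rest : List (Int × List Int)) (faces : List (List Int)) :
    dfsB edges nb ((cur, path) :: rest) faces
      = if (path.length : Int) ≥ nb then
          dfsB edges nb rest (if path.headI = cur then faces ++ [path] else faces)
        else if cur ∈ path then dfsB edges nb rest faces
        else dfsB edges nb (pushFramesB edges cur (path ++ [cur]) rest) faces := by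
  unfold dfsB
  simp only [List.map_cons, List.sum_cons]
  have hw := pvFrameW_pos edges nb (cur, path)
  have hk : pvFrameW edges nb (cur, path) + ((rest.map (pvFrameW edges nb)).sum : Nat)
      = (pvFrameW edges nb (cur, path) + (rest.map (pvFrameW edges nb)).sum - 1) + 1 := by omega
  rw [hk, dfsBFuel]
  by_cases hge : (path.length : Int) ≥ nb
  · simp only [if_pos hge]
    exact dfsBFuel_eq edges nb _ _ _ _ (by omega) (le_refl _)
  · simp only [if_neg hge]
    by_cases hmem : cur ∈ path
    · simp only [if_pos hmem]
      exact dfsBFuel_eq edges nb _ _ _ _ (by omega) (le_refl _)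
    · simp only [if_neg hmem]
      have hlt := pushFramesB_wsum_lt edges nb cur path rest (by omega)
      simp only [List.map_cons, List.sum_cons] at hlt
      exact dfsBFuel_eq edges nb _ _ _ _ (by omega) (le_refl _)

-- the stack loop processes the top frame exactly as one call of the recursive helper
theorem dfsB_frame (edges : List (Int × Int)) (nb : Int) :
    ∀ (b : Nat) (path : List Int) (cur : Int), (nb - (path.length : Int)).toNat ≤ b →
      ∀ (rest : List (Int × List Int)) (faces : List (List Int)),
        dfsB edges nb ((cur, path) :: rest) faces
          = dfsB edges nb rest (facesRecA edges nb path cur faces) := by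
  intro b
  induction b with
  | zero =>
    intro path cur hb rest faces
    have hge : (path.length : Int) ≥ nb := by omega
    rw [dfsB_cons, facesRecA]
    simp [hge]
  | succ b ih =>
    intro path cur hb rest faces
    rw [dfsB_cons, facesRecA]
    by_cases hge : (path.length : Int) ≥ nb
    · simp [hge]
    · simp only [if_neg hge]
      by_cases hmem : cur ∈ path
      · simp [hmem]
      · simp only [if_neg hmem, pushFramesB]
        have hnp : (nb - (((path ++ [cur]).length : Nat) : Int)).toNat ≤ b := by
          simp only [List.length_append, List.length_cons, List.length_nil]
          omega
        have key : ∀ (es : List (Int × Int)) (faces : List (List Int)),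
            dfsB edges nb
              (es.reverse.foldl
                (fun st e =>
                  if cur = e.1 then (e.2, path ++ [cur]) :: st
                  else if cur = e.2 then (e.1, path ++ [cur]) :: st
                  else st) rest) faces
              = dfsB edges nb rest
                  (es.foldl
                    (fun fs e =>
                      if cur = e.1 ∨ cur = e.2 then
                        facesRecA edges nb (path ++ [cur]) (if cur = e.1 then e.2 else e.1) fs
                      else fs) faces) := by
          intro es
          induction es with
          | nil => intro faces; rfl
          | cons e es ihes =>
            intro faces
            rw [List.reverse_cons, List.foldl_append]
            simp only [List.foldl_cons, List.foldl_nil]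
            by_cases h1 : cur = e.1
            · simp only [if_pos h1, if_pos (Or.inl h1)]
              rw [ih _ _ hnp]
              exact ihes _
            · by_cases h2 : cur = e.2
              · simp only [if_neg h1, if_pos h2, if_pos (Or.inr h2)]
                rw [ih _ _ hnp]
                exact ihes _
              · have : ¬ (cur = e.1 ∨ cur = e.2) := by tauto
                simp only [if_neg h1, if_neg h2, if_neg this]
                exact ihes _
        exact key edges faces

theorem dedupFacesB_eq (faces : List (List Int)) : dedupFacesB faces = dedupFacesA faces := rfl

theorem dfsB_single (edges : List (Int × Int)) (nb : Int) (s : Int) (fs : List (List Int)) :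
    dfsB edges nb [(s, [])] fs = facesRecA edges nb [] s fs := by
  rw [dfsB_frame edges nb ((nb - (([] : List Int).length : Int)).toNat) [] s (le_refl _) [] fs]
  rw [dfsB_nil]

-- ===== VERDICT (by name: the statement is the Claim_ definition above) =====
theorem get_object_faces_py_spec : Claim_equal_get_object_faces_py := by
  intro points edges nb hdom hpre
  unfold Spec_get_object_faces_py
  simp only [get_object_faces_py, get_object_faces_py_alt]
  rw [dedupFacesB_eq]
  have hfaces : (PySem.List.pyRange 0 (PySem.List.len points) 1).foldl
        (fun fs start => dfsB edges nb [(start, [])] fs) ([] : List (List Int))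
      = (PySem.List.enumerate points 0).foldl
        (fun fs pe => facesRecA edges nb [] pe.1 fs) [] := by
    have hstep : (fun fs (s : Int) => dfsB edges nb [(s, [])] fs)
        = (fun fs s => facesRecA edges nb [] s fs) := by
      funext fs s
      exact dfsB_single edges nb s fs
    rw [hstep]
    have hmap : (PySem.List.enumerate points 0).map (fun pe => pe.1)
        = PySem.List.pyRange 0 (0 + (points.length : Int)) 1 :=
      PySem.List.map_fst_enumerate points 0
    calc (PySem.List.pyRange 0 (PySem.List.len points) 1).foldl
          (fun fs s => facesRecA edges nb [] s fs) ([] : List (List Int))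
        = ((PySem.List.enumerate points 0).map (fun pe => pe.1)).foldl
            (fun fs s => facesRecA edges nb [] s fs) [] := by
          rw [hmap]; norm_num [PySem.List.len_eq]
      _ = (PySem.List.enumerate points 0).foldl
            (fun fs pe => facesRecA edges nb [] pe.1 fs) [] := List.foldl_map
  rw [hfaces]
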